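-- pv_equiv track=rewrite | github.com/martimrocha5/ATP2025 | Projeto/analisar.py | distribuicao_desportos
-- ===== SOURCE A (Python) =====
-- def distribuicao_desportos(lista):
--     """Frequência de desportos (Ordenado Alfabeticamente)."""
--     res = {}
--
--     for p in lista:
--         for d in p["desportos"]:
--             if d in res:
--                 res[d] += 1
--             else:
--                 res[d] = 1
--
--     # Ordena o dicionário pelas chaves (nome do desporto)
--     return dict(sorted(res.items()))
-- ===== SOURCE B (Python) =====
-- def distribuicao_desportos(lista):
--     """Frequência de desportos (Ordenado Alfabeticamente)."""
--     todos = sorted(d for p in lista for d in p["desportos"])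
--     res = {}
--     while todos:
--         d = todos[0]
--         k = 1
--         while k < len(todos) and todos[k] == d:
--             k += 1
--         res[d] = k
--         todos = todos[k:]
--     return res
-- ===== Notes on version B (the rewrite author's own statement) =====
-- stated objective: alternative
-- what changed: Replaces A's dict-counting pass followed by sorted(res.items()) with flattening all sport lists into one list, sorting it, and run-length scanning the sorted list so the result dict comes out already in alphabetical order with no final sort of items.
import Mathlib
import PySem

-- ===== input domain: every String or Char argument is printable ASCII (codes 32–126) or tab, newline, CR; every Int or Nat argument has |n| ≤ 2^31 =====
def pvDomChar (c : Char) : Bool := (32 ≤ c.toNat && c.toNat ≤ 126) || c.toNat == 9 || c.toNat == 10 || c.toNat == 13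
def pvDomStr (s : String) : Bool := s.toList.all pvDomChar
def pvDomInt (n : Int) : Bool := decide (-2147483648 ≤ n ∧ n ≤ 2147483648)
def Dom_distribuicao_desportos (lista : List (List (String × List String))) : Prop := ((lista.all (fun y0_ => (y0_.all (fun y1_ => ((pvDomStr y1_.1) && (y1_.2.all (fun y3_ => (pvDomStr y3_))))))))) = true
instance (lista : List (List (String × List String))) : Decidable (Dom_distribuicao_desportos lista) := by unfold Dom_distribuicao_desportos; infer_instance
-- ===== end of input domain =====

-- B replaces A's dict-counting pass followed by sorted() with flatten-sort-then-run-length-scan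
-- (objective: alternative decomposition, same asymptotic cost).

-- p["desportos"]: first-match lookup in the record; total form `.getD []` is exact under
-- Pre_ (the key is present; Python raises KeyError otherwise, on both A and B).
def pvDesportos (p : List (String × List String)) : List String :=
  ((PySem.Dict.mk p).get? "desportos").getD []

-- ===== PORT A =====
def distribuicao_desportos (lista : List (List (String × List String))) : List (String × Int) :=
  let res : PySem.Dict String Int := lista.foldl
    (fun res p => (pvDesportos p).foldl
      (fun res d =>
        if res.contains d then res.insert d (res.getD d 0 + 1)  -- res[d] += 1 (key present)
        else res.insert d 1)
      res)
    PySem.Dict.empty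
  -- dict(sorted(res.items())): Python compares the (key, value) tuples lexicographically
  (PySem.Dict.ofList (PySem.List.sorted2 res.items Prod.fst Prod.snd)).items

-- ===== PORT B =====
-- the while-loop of Source B: k counts the leading run equal to todos[0] (the inner while),
-- todos[k:] drops exactly that run since its first k elements all equal todos[0]
def pvRunScan : List String → PySem.Dict String Int → PySem.Dict String Int
  | [], res => res
  | x :: rest, res =>
    let k : Int := 1 + (rest.takeWhile (fun y => y == x)).length
    pvRunScan (rest.dropWhile (fun y => y == x)) (res.insert x k)
termination_by l _ => l.length
decreasing_by
  have := List.length_dropWhile_le (fun y => y == x) rest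
  simp; omega

def distribuicao_desportos_alt (lista : List (List (String × List String))) : List (String × Int) :=
  let todos := PySem.List.sorted (lista.flatMap pvDesportos) (fun x => x) false
  (pvRunScan todos PySem.Dict.empty).items

-- ===== PRECONDITION & SPEC =====
-- Pre_: every record carries the key "desportos" (Python A raises KeyError otherwise).
def Pre_distribuicao_desportos (lista : List (List (String × List String))) : Prop :=
  ∀ p ∈ lista, (PySem.Dict.mk p).contains "desportos" = true
instance (lista : List (List (String × List String))) : Decidable (Pre_distribuicao_desportos lista) := by unfold Pre_distribuicao_desportos; infer_instance
def pvWitness_distribuicao_desportos : (List (List (String × List String))) :=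
  [[("desportos", ["ten", "fut"])], [("desportos", ["fut"]), ("nome", [])]]

def Spec_distribuicao_desportos (lista : List (List (String × List String))) (out : List (String × Int)) : Prop := out = distribuicao_desportos_alt lista
instance (lista : List (List (String × List String))) (out : List (String × Int)) : Decidable (Spec_distribuicao_desportos lista out) := by unfold Spec_distribuicao_desportos; infer_instance

-- ===== CLAIM (what is proved, stated in full; the proofs are below) =====
def Claim_equal_distribuicao_desportos : Prop := ∀ (lista : List (List (String × List String))), Dom_distribuicao_desportos lista → Pre_distribuicao_desportos lista → Spec_distribuicao_desportos lista (distribuicao_desportos lista)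

-- ===== LEMMAS AND PROOFS =====

-- the flattened list of sport names
def pvFlat (lista : List (List (String × List String))) : List String :=
  lista.flatMap pvDesportos

-- A's nested loops are one loop over the flattened list
lemma pv_foldl_flatMap {α β γ : Type} (g : α → List β) (f : γ → β → γ) (l : List α) (init : γ) :
    l.foldl (fun acc x => (g x).foldl f acc) init = (l.flatMap g).foldl f init := by
  induction l generalizing init with
  | nil => rfl
  | cons p ps ih => simp [List.foldl_append, ih]

-- A's counting branch is the unconditional counter update
lemma pv_branch_eq (res : PySem.Dict String Int) (d : String) :
    (if res.contains d then res.insert d (res.getD d 0 + 1) else res.insert d 1)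
      = res.insert d (res.getD d 0 + 1) := by
  by_cases h : res.contains d = true
  · simp [h]
  · have hn : res.getD d 0 = 0 := by
      simp only [PySem.Dict.getD, PySem.Dict.get?]
      have hfind : res.items.find? (fun p => p.1 == d) = none := by
        rw [List.find?_eq_none]
        intro p hp hb
        apply h
        simp only [PySem.Dict.contains, List.any_eq_true]
        exact ⟨p, hp, hb⟩
      simp [hfind]
    simp [h, hn]

-- A's dict is Counter(flat)
lemma pv_res_eq_counter (lista : List (List (String × List String))) :
    (lista.foldl
      (fun res p => (pvDesportos p).foldl
        (fun res d =>
          if res.contains d then res.insert d (res.getD d 0 + 1) else res.insert d 1)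
        res)
      PySem.Dict.empty) = PySem.Dict.counter (pvFlat lista) := by
  have h1 : (fun (res : PySem.Dict String Int) (d : String) =>
      if res.contains d then res.insert d (res.getD d 0 + 1) else res.insert d 1)
      = fun res d => res.insert d (res.getD d 0 + 1) := by
    funext res d; exact pv_branch_eq res d
  rw [h1, pv_foldl_flatMap]
  exact PySem.Dict.foldl_insert_getD_add_one_eq_counter _

-- insertBy only looks at `before x ·` on the current list
lemma pv_insertBy_congr {α : Type} (bef bef' : α → α → Bool) (x : α) (acc : List α)
    (h : ∀ y ∈ acc, bef x y = bef' x y) :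
    PySem.List.insertBy bef x acc = PySem.List.insertBy bef' x acc := by
  induction acc with
  | nil => rfl
  | cons y ys ih =>
    rw [PySem.List.insertBy.eq_2, PySem.List.insertBy.eq_2, h y (by simp)]
    by_cases hb : bef' x y = true
    · simp [hb]
    · simp only [Bool.not_eq_true] at hb
      simp [hb, ih (fun z hz => h z (by simp [hz]))]

lemma pv_foldl_insertBy_congr {α : Type} (bef bef' : α → α → Bool) (S : List α) :
    ∀ (l : List α) (acc : List α), (∀ x ∈ l, x ∈ S) → (∀ y ∈ acc, y ∈ S) →
    (∀ a ∈ S, ∀ b ∈ S, bef a b = bef' a b) →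
    l.foldl (fun acc x => PySem.List.insertBy bef x acc) acc
      = l.foldl (fun acc x => PySem.List.insertBy bef' x acc) acc := by
  intro l
  induction l with
  | nil => intro acc _ _ _; rfl
  | cons x xs ih =>
    intro acc hl hacc h
    have hx : x ∈ S := hl x (by simp)
    simp only [List.foldl_cons]
    rw [pv_insertBy_congr bef bef' x acc (fun y hy => h x hx y (hacc y hy))]
    exact ih _ (fun z hz => hl z (by simp [hz]))
      (fun y hy => by
        rcases (PySem.List.insertBy_mem_iff bef' x y acc).1 hy with rfl | hy'
        · exact hx
        · exact hacc y hy') h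

-- Python's tuple comparison in sorted(res.items()) never reaches the second
-- component when the first components are distinct
lemma pv_sorted2_eq_sorted_fst (xs : List (String × Int)) (hnd : (xs.map Prod.fst).Nodup) :
    PySem.List.sorted2 xs Prod.fst Prod.snd = PySem.List.sorted xs Prod.fst := by
  simp only [PySem.List.sorted2, PySem.List.sorted, if_neg (by decide : ¬ (false = true))]
  apply pv_foldl_insertBy_congr (S := xs) _ _ _ _ (fun _ h => h) (by simp)
  intro a ha b hb
  by_cases hfst : a.1 = b.1
  · have hab : a = b := by
      by_contra hne
      have := List.inj_on_of_nodup_map hnd ha hb hfst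
      exact hne this
    subst hab
    simp
  · rcases lt_trichotomy a.1 b.1 with hlt | heq | hgt
    · simp [hlt]
    · exact absurd heq hfst
    · have h1 : ¬ a.1 < b.1 := not_lt_of_gt hgt
      simp [h1, hgt]

-- splitting a sorted list at its leading run
lemma pv_run_split (x : String) (rest : List String) (h : (x :: rest).Pairwise (· ≤ ·)) :
    (∀ y ∈ rest.takeWhile (fun y => y == x), y = x) ∧
    (∀ y ∈ rest.dropWhile (fun y => y == x), x < y) := by
  constructor
  · intro y hy
    have := List.mem_takeWhile_imp hy
    simpa using this
  · intro y hy
    have hsub : (rest.dropWhile (fun y => y == x)).Sublist rest := List.dropWhile_sublist _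
    have hrest : rest.Pairwise (· ≤ ·) := h.of_cons
    have hdp : (rest.dropWhile (fun y => y == x)).Pairwise (· ≤ ·) := hrest.sublist hsub
    have hle : x ≤ y := by
      rcases List.rel_of_pairwise_cons h (hsub.mem hy) with h'
      exact h'
    rcases eq_or_lt_of_le hle with rfl | hlt
    · -- y = x inside the dropWhile part: its head is ≠ x, everything after is ≥ head
      cases hd : rest.dropWhile (fun y => y == x) with
      | nil => simp [hd] at hy
      | cons z zs =>
        have hz : ¬ (z == x) = true := by
          have := List.head?_dropWhile_not (fun y => y == x) rest
          simp [hd] at this; simpa using this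
        have hzx : z ≠ x := by simpa using hz
        have hzlex : x ≤ z := by
          have hzmem : z ∈ rest := hsub.mem (by simp [hd])
          exact List.rel_of_pairwise_cons h hzmem
        rw [hd] at hy hdp
        rcases List.mem_cons.1 hy with rfl | hy'
        · exact absurd rfl hzx
        · have hzy : z ≤ x := List.rel_of_pairwise_cons hdp hy'
          exact absurd (le_antisymm hzy hzlex) hzx
    · exact hlt

-- run-length of the leading run = total count in the sorted list
lemma pv_count_head (x : String) (rest : List String) (h : (x :: rest).Pairwise (· ≤ ·)) :
    (List.count x (x :: rest) : Int) = 1 + (rest.takeWhile (fun y => y == x)).length := by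
  obtain ⟨ht, hr⟩ := pv_run_split x rest h
  have hsplit : rest = rest.takeWhile (fun y => y == x) ++ rest.dropWhile (fun y => y == x) :=
    (List.takeWhile_append_dropWhile).symm
  have hct : List.count x (rest.takeWhile (fun y => y == x)) = (rest.takeWhile (fun y => y == x)).length := by
    apply List.count_eq_length.2
    intro y hy; exact ((ht y hy) ▸ rfl : x = y) ▸ rfl
  have hcr : List.count x (rest.dropWhile (fun y => y == x)) = 0 := by
    apply List.count_eq_zero.2
    intro hmem
    exact lt_irrefl x (hr x hmem)
  have hrest : List.count x rest = (rest.takeWhile (fun y => y == x)).length := by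
    conv_lhs => rw [hsplit]
    rw [List.count_append, hct, hcr]
    omega
  rw [List.count_cons_self, hrest]
  push_cast
  ring

-- counts of the surviving elements are unchanged by dropping the leading run
lemma pv_count_tail (x : String) (rest : List String) (h : (x :: rest).Pairwise (· ≤ ·))
    (y : String) (hy : y ∈ rest.dropWhile (fun y => y == x)) :
    List.count y (rest.dropWhile (fun y => y == x)) = List.count y (x :: rest) := by
  obtain ⟨ht, hr⟩ := pv_run_split x rest h
  have hyx : y ≠ x := fun he => lt_irrefl x (he ▸ hr y hy)
  have hsplit : rest = rest.takeWhile (fun y => y == x) ++ rest.dropWhile (fun y => y == x) :=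
    (List.takeWhile_append_dropWhile).symm
  have hct : List.count y (rest.takeWhile (fun y => y == x)) = 0 := by
    apply List.count_eq_zero.2
    intro hmem
    exact hyx (ht y hmem)
  have hrest : List.count y rest
      = List.count y (rest.takeWhile (fun y => y == x)) + List.count y (rest.dropWhile (fun y => y == x)) := by
    conv_lhs => rw [hsplit]
    rw [List.count_append]
  rw [List.count_cons_of_ne hyx.symm, hrest, hct]
  omega

-- the scanned dict's items are Counter(l)'s items, up to order (keys of d untouched)
lemma pv_runScan_perm : ∀ (l : List String) (d : PySem.Dict String Int),
    l.Pairwise (· ≤ ·) → (∀ y ∈ l, d.contains y = false) →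
    (pvRunScan l d).items.Perm
      (d.items ++ (PySem.Set.ofList l).map (fun k => (k, (List.count k l : Int)))) := by
  intro l d
  induction l, d using pvRunScan.induct with
  | case1 res =>
    intro _ _
    simp [pvRunScan, PySem.Set.ofList]
  | case2 x rest res k ih =>
    intro hs hf
    obtain ⟨ht, hr⟩ := pv_run_split x rest hs
    have hsplit : rest = rest.takeWhile (fun y => y == x) ++ rest.dropWhile (fun y => y == x) :=
      (List.takeWhile_append_dropWhile).symm
    have hcx : res.contains x = false := hf x (List.mem_cons_self)
    have hitems : (res.insert x k).items = res.items ++ [(x, k)] :=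
      PySem.Dict.items_insert_of_not_contains res k hcx
    have hrmem : ∀ y ∈ rest.dropWhile (fun y => y == x), y ∈ x :: rest :=
      fun y hy => List.mem_cons_of_mem _ ((List.dropWhile_sublist _).mem hy)
    have hf' : ∀ y ∈ rest.dropWhile (fun y => y == x), (res.insert x k).contains y = false := by
      intro y hy
      have h0 : res.contains y = false := hf y (hrmem y hy)
      have hxy : (x == y) = false := by
        have := hr y hy
        simp only [beq_eq_false_iff_ne, ne_eq]
        intro he; exact lt_irrefl x (he ▸ this)
      simp only [PySem.Dict.contains, hitems, List.any_append, List.any_cons, List.any_nil,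
        Bool.or_false] at h0 ⊢
      simp at h0
      simp [hxy]
      exact h0
    have hs' : (rest.dropWhile (fun y => y == x)).Pairwise (· ≤ ·) :=
      hs.of_cons.sublist (List.dropWhile_sublist _)
    have hperm := ih hs' hf'
    rw [pvRunScan]
    refine hperm.trans ?_
    rw [hitems, List.append_assoc]
    apply List.Perm.append_left
    -- the surviving counts are counts in the whole list
    have hmapeq : (PySem.Set.ofList (rest.dropWhile (fun y => y == x))).map
          (fun y => (y, (List.count y (rest.dropWhile (fun y => y == x)) : Int)))
        = (PySem.Set.ofList (rest.dropWhile (fun y => y == x))).map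
          (fun y => (y, (List.count y (x :: rest) : Int))) := by
      apply List.map_congr_left
      intro y hy
      rw [pv_count_tail x rest hs y ((PySem.Set.mem_ofList _ _).1 hy)]
    rw [hmapeq]
    -- (x, k) is exactly the head entry of Counter(x :: rest)
    have hk : (x, k) = (x, (List.count x (x :: rest) : Int)) := by
      rw [pv_count_head x rest hs]
    have hxnotr : x ∉ PySem.Set.ofList (rest.dropWhile (fun y => y == x)) := by
      rw [PySem.Set.mem_ofList]
      intro hmem; exact lt_irrefl x (hr x hmem)
    have hpermsets : (x :: PySem.Set.ofList (rest.dropWhile (fun y => y == x))).Perm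
        (PySem.Set.ofList (x :: rest)) := by
      apply List.perm_of_nodup_nodup_toFinset_eq
      · exact List.nodup_cons.2 ⟨hxnotr, PySem.Set.nodup_ofList _⟩
      · exact PySem.Set.nodup_ofList _
      · ext y
        simp only [List.mem_toFinset, List.mem_cons, PySem.Set.mem_ofList]
        constructor
        · rintro (rfl | hy)
          · exact Or.inl rfl
          · exact Or.inr (((List.dropWhile_sublist _).mem hy))
        · rintro (rfl | hy)
          · exact Or.inl rfl
          · rw [hsplit] at hy
            rcases List.mem_append.1 hy with hy' | hy'
            · exact Or.inl (ht y hy')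
            · exact Or.inr hy'
    rw [List.singleton_append]
    have hcons : (x :: PySem.Set.ofList (rest.dropWhile (fun y => y == x))).map
          (fun y => (y, (List.count y (x :: rest) : Int)))
        = ((x, k) :: (PySem.Set.ofList (rest.dropWhile (fun y => y == x))).map
          (fun y => (y, (List.count y (x :: rest) : Int)))) := by
      rw [List.map_cons, ← hk]
    rw [← hcons]
    exact hpermsets.map _

-- the scanned dict's keys come out strictly increasing
lemma pv_runScan_pairwise : ∀ (l : List String) (d : PySem.Dict String Int),
    l.Pairwise (· ≤ ·) →
    (∀ pr ∈ d.items, ∀ y ∈ l, pr.1 < y) →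
    d.items.Pairwise (fun a b => a.1 < b.1) →
    (pvRunScan l d).items.Pairwise (fun a b => a.1 < b.1) := by
  intro l d
  induction l, d using pvRunScan.induct with
  | case1 res =>
    intro _ _ hd
    simpa [pvRunScan] using hd
  | case2 x rest res k ih =>
    intro hs hlt hd
    obtain ⟨ht, hr⟩ := pv_run_split x rest hs
    have hcx : res.contains x = false := by
      by_contra hc
      rw [Bool.not_eq_false, PySem.Dict.contains, List.any_eq_true] at hc
      obtain ⟨pr, hpr, hbe⟩ := hc
      have : pr.1 = x := by simpa using hbe
      exact lt_irrefl x (this ▸ hlt pr hpr x (List.mem_cons_self))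
    have hitems : (res.insert x k).items = res.items ++ [(x, k)] :=
      PySem.Dict.items_insert_of_not_contains res k hcx
    have hs' : (rest.dropWhile (fun y => y == x)).Pairwise (· ≤ ·) :=
      hs.of_cons.sublist (List.dropWhile_sublist _)
    rw [pvRunScan]
    apply ih hs'
    · intro pr hpr y hy
      rw [hitems] at hpr
      rcases List.mem_append.1 hpr with hpr' | hpr'
      · exact hlt pr hpr' y (List.mem_cons_of_mem _ ((List.dropWhile_sublist _).mem hy))
      · have : pr = (x, k) := by simpa using hpr'
        rw [this]
        exact hr y hy
    · rw [hitems]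
      apply List.pairwise_append.2
      refine ⟨hd, List.pairwise_singleton _ _, ?_⟩
      intro pr hpr pr' hpr'
      have : pr' = (x, k) := by simpa using hpr'
      rw [this]
      exact hlt pr hpr x (List.mem_cons_self)

-- ===== VERDICT (by name: the statement is the Claim_ definition above) =====
theorem distribuicao_desportos_spec : Claim_equal_distribuicao_desportos := by
  intro lista _ _
  unfold Spec_distribuicao_desportos
  show (PySem.Dict.ofList (PySem.List.sorted2
      (lista.foldl
        (fun res p => (pvDesportos p).foldl
          (fun res d =>
            if res.contains d then res.insert d (res.getD d 0 + 1) else res.insert d 1)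
          res)
        PySem.Dict.empty).items Prod.fst Prod.snd)).items
    = (pvRunScan (PySem.List.sorted (lista.flatMap pvDesportos) (fun x => x) false)
        PySem.Dict.empty).items
  rw [pv_res_eq_counter]
  have hsorted : (PySem.List.sorted (pvFlat lista) (fun x => x) false).Pairwise (· ≤ ·) :=
    PySem.List.sorted_pairwise (pvFlat lista) (fun x => x)
  have hempty : ∀ y ∈ PySem.List.sorted (pvFlat lista) (fun x => x) false,
      (PySem.Dict.empty : PySem.Dict String Int).contains y = false := by
    intro y _; rfl
  have hperm0 := pv_runScan_perm (PySem.List.sorted (pvFlat lista) (fun x => x) false)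
    PySem.Dict.empty hsorted hempty
  have hpw := pv_runScan_pairwise (PySem.List.sorted (pvFlat lista) (fun x => x) false)
    PySem.Dict.empty hsorted (by intro pr hpr; simp [PySem.Dict.empty] at hpr)
    (by simp [PySem.Dict.empty])
  set todos := PySem.List.sorted (pvFlat lista) (fun x => x) false with htodos
  set B_list := (pvRunScan todos PySem.Dict.empty).items with hB
  -- B's list is a permutation of Counter(flat).items
  have hcount : ∀ y, List.count y todos = List.count y (pvFlat lista) :=
    fun y => (PySem.List.sorted_perm (pvFlat lista) (fun x => x) false).count_eq y
  have hpermsets : (PySem.Set.ofList todos).Perm (PySem.Set.ofList (pvFlat lista)) := by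
    apply List.perm_of_nodup_nodup_toFinset_eq (PySem.Set.nodup_ofList _) (PySem.Set.nodup_ofList _)
    ext y
    simp only [List.mem_toFinset, PySem.Set.mem_ofList, htodos, PySem.List.mem_sorted]
  have hperm : B_list.Perm ((PySem.Dict.counter (pvFlat lista)).items) := by
    rw [PySem.Dict.items_counter]
    refine hperm0.trans ?_
    rw [show (PySem.Dict.empty : PySem.Dict String Int).items = [] from rfl, List.nil_append]
    have hmap : (PySem.Set.ofList todos).map (fun k => (k, (List.count k todos : Int)))
        = (PySem.Set.ofList todos).map (fun k => (k, (List.count k (pvFlat lista) : Int))) := by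
      apply List.map_congr_left
      intro y _
      rw [hcount y]
    rw [hmap]
    exact hpermsets.map _
  -- hence A's sorted() of the counter items is exactly B's list
  have hnd : ((PySem.Dict.counter (pvFlat lista)).items.map Prod.fst).Nodup := by
    have : (PySem.Dict.counter (pvFlat lista)).items.map Prod.fst
        = (PySem.Dict.counter (pvFlat lista)).keys := rfl
    rw [this, PySem.Dict.keys_counter]
    exact PySem.Set.nodup_ofList _
  rw [pv_sorted2_eq_sorted_fst _ hnd,
    PySem.List.sorted_eq_of_perm_of_pairwise_lt _ B_list Prod.fst hperm hpw]
  -- dict() of a list with pairwise-distinct keys keeps it unchanged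
  have hndB : (B_list.map Prod.fst).Nodup := by
    have hpwne : (B_list.map Prod.fst).Pairwise (· ≠ ·) := by
      rw [List.pairwise_map]
      exact hpw.imp (fun h => ne_of_lt h)
    exact hpwne
  show (PySem.Dict.empty.update B_list).items = B_list
  rw [PySem.Dict.update]
  rw [PySem.Dict.items_foldl_insert_fresh B_list Prod.fst Prod.snd PySem.Dict.empty
    (fun a _ => rfl) hndB]
  simp [PySem.Dict.empty]
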